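-- pv_equiv track=rewrite | github.com/ferreum/distanceutils | distance_scripts/filterlevel.py | make_arglist
-- ===== SOURCE A (Python) =====
-- def make_arglist(s):
--
--     def iter_tokens(source):
--         if not source:
--             return
--         token = []
--         escape = False
--         for char in source:
--             if escape:
--                 escape = False
--                 token.append(char)
--             elif char == '\\':
--                 escape = True
--             elif char == ':':
--                 yield token
--                 token = []
--             else:
--                 token.append(char)
--         yield token
--
--     return ["--" + ''.join(token) for token in iter_tokens(s)]
-- ===== SOURCE B (Python) =====
-- def make_arglist(s):
--     if not s:
--         return []
--
--     def split_first(chars):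
--         # Consume up to the first unescaped ':'; an escape pair '\x' is one
--         # two-char atom contributing 'x'. Returns (token, rest-after-colon or None).
--         out = []
--         i, n = 0, len(chars)
--         while i < n:
--             c = chars[i]
--             if c == '\\':
--                 if i + 1 < n:
--                     out.append(chars[i + 1])
--                 i += 2
--             elif c == ':':
--                 return ''.join(out), chars[i + 1:]
--             else:
--                 out.append(c)
--                 i += 1
--         return ''.join(out), None
--
--     args = []
--     rest = s
--     while rest is not None:
--         token, rest = split_first(rest)
--         args.append('--' + token)
--     return args
-- ===== Notes on version B (the rewrite author's own statement) =====
-- stated objective: alternative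
-- what changed: Replaces the generator with a boolean escape-flag state machine by a recursive split on the first unescaped colon, where an escape pair is consumed as a single two-character atom (no escape flag, no generator).
import Mathlib
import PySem

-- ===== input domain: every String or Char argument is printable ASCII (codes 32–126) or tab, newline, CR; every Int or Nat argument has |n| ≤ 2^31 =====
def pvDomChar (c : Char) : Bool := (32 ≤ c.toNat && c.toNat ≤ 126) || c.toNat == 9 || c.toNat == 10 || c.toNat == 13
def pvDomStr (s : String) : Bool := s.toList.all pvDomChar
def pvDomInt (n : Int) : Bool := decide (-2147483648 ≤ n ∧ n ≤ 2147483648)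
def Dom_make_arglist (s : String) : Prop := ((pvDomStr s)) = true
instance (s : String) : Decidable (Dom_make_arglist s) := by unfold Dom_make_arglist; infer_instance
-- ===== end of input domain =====

-- B replaces A's escape-flag state machine (a generator) by a recursive split on the
-- first unescaped colon that consumes each escape pair as one two-char atom; same values.

-- ===== PORT A =====
-- the `for char in source` loop of iter_tokens: state = (token, escape); yields become list conses
def makeArglistLoopA : List Char → List Char → Bool → List (List Char)
  | [], token, _ => [token]                                   -- final `yield token`
  | c :: rest, token, escape =>
    if escape then makeArglistLoopA rest (token ++ [c]) false -- escape: token.append(char)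
    else if c = '\\' then makeArglistLoopA rest token true    -- set escape
    else if c = ':' then token :: makeArglistLoopA rest [] false  -- yield token; token = []
    else makeArglistLoopA rest (token ++ [c]) false           -- token.append(char)

def make_arglist (s : String) : List String :=
  if s.toList = [] then []                                    -- `if not source: return`
  else (makeArglistLoopA s.toList [] false).map (fun t => String.mk ('-' :: '-' :: t))  -- "--" + ''.join(token)

-- ===== PORT B =====
-- split_first's index loop, as recursion on the char list: an escape pair is one atom
def splitFirst : List Char → List Char × Option (List Char)
  | [] => ([], none)
  | c :: rest =>
    if c = '\\' then
      match rest with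
      | [] => ([], none)                       -- dangling backslash: nothing appended, loop ends
      | d :: rest' =>
        let p := splitFirst rest'
        (d :: p.1, p.2)                        -- out.append(chars[i+1]); i += 2
    else if c = ':' then ([], some rest)       -- return ''.join(out), chars[i+1:]
    else
      let p := splitFirst rest
      (c :: p.1, p.2)                          -- out.append(c); i += 1

-- unfolding facts about splitFirst (cited by the proofs and by termination)
theorem splitFirst_nil : splitFirst [] = ([], none) := rfl
theorem splitFirst_esc_nil : splitFirst ['\\'] = ([], none) := rfl
theorem splitFirst_esc (d : Char) (rest' : List Char) :
    splitFirst ('\\' :: d :: rest') = (d :: (splitFirst rest').1, (splitFirst rest').2) := rfl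
theorem splitFirst_colon (rest : List Char) : splitFirst (':' :: rest) = ([], some rest) := by
  rw [splitFirst.eq_def]; simp
theorem splitFirst_other (c : Char) (rest : List Char) (hc : c ≠ '\\') (hcol : c ≠ ':') :
    splitFirst (c :: rest) = (c :: (splitFirst rest).1, (splitFirst rest).2) := by
  rw [splitFirst.eq_def]; simp [hc, hcol]

-- termination of B's outer `while rest is not None` loop
theorem splitFirst_some_lt_aux : ∀ (n : ℕ) (chars t r : List Char), chars.length ≤ n →
    splitFirst chars = (t, some r) → r.length < chars.length := by
  intro n
  induction n with
  | zero =>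
    intro chars t r hlen h
    have : chars = [] := List.length_eq_zero_iff.mp (Nat.le_zero.mp hlen)
    subst this; simp [splitFirst_nil] at h
  | succ n ih =>
    intro chars t r hlen h
    match chars with
    | [] => simp [splitFirst_nil] at h
    | c :: rest =>
      by_cases hc : c = '\\'
      · subst hc
        match rest with
        | [] => simp [splitFirst_esc_nil] at h
        | d :: rest' =>
          rw [splitFirst_esc] at h
          have h2 : (splitFirst rest').2 = some r := by
            have := congrArg Prod.snd h; simpa using this
          rcases hp : splitFirst rest' with ⟨t', r'⟩
          rw [hp] at h2; simp at h2; subst h2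
          have := ih rest' t' r (by simp at hlen ⊢; omega) hp
          simp; omega
      · by_cases hcol : c = ':'
        · subst hcol
          rw [splitFirst_colon] at h
          simp at h; simp [h.2]
        · rw [splitFirst_other c rest hc hcol] at h
          have h2 : (splitFirst rest).2 = some r := by
            have := congrArg Prod.snd h; simpa using this
          rcases hp : splitFirst rest with ⟨t', r'⟩
          rw [hp] at h2; simp at h2; subst h2
          have := ih rest t' r (by simp at hlen ⊢; omega) hp
          simp; omega

theorem splitFirst_some_lt (chars t r : List Char) (h : splitFirst chars = (t, some r)) :
    r.length < chars.length :=
  splitFirst_some_lt_aux chars.length chars t r le_rfl h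

-- B's outer loop: collect tokens while rest is not None
def makeAltTokens (chars : List Char) : List (List Char) :=
  match h : splitFirst chars with
  | (t, none) => [t]
  | (t, some r) => t :: makeAltTokens r
termination_by chars.length
decreasing_by exact splitFirst_some_lt chars t r h

def make_arglist_alt (s : String) : List String :=
  if s.toList = [] then []
  else (makeAltTokens s.toList).map (fun t => String.mk ('-' :: '-' :: t))  -- '--' + token

-- ===== PRECONDITION & SPEC =====
def Spec_make_arglist (s : String) (out : List String) : Prop := out = make_arglist_alt s
instance (s : String) (out : List String) : Decidable (Spec_make_arglist s out) := by unfold Spec_make_arglist; infer_instance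

-- ===== CLAIM (what is proved, stated in full; the proofs are below) =====
def Claim_equal_make_arglist : Prop := ∀ (s : String), Dom_make_arglist s → Spec_make_arglist s (make_arglist s)

-- ===== LEMMAS AND PROOFS =====
def optRest : Option (List Char) → List (List Char)
  | none => []
  | some r => makeAltTokens r

theorem makeAltTokens_eq (chars : List Char) :
    makeAltTokens chars = (splitFirst chars).1 :: optRest (splitFirst chars).2 := by
  rw [makeAltTokens]
  rcases h : splitFirst chars with ⟨t, _ | r⟩ <;> simp [h, optRest]

theorem key : ∀ (n : ℕ) (chars token : List Char), chars.length ≤ n →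
    makeArglistLoopA chars token false
      = (token ++ (splitFirst chars).1) :: optRest (splitFirst chars).2 := by
  intro n
  induction n with
  | zero =>
    intro chars token h
    have : chars = [] := List.length_eq_zero_iff.mp (Nat.le_zero.mp h)
    subst this; simp [makeArglistLoopA, splitFirst_nil, optRest]
  | succ n ih =>
    intro chars token h
    match chars with
    | [] => simp [makeArglistLoopA, splitFirst_nil, optRest]
    | c :: rest =>
      by_cases hc : c = '\\'
      · subst hc
        match rest with
        | [] => simp [makeArglistLoopA, splitFirst_esc_nil, optRest]
        | d :: rest' =>
          have hlen : rest'.length ≤ n := by simp at h; omega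
          have hih := ih rest' (token ++ [d]) hlen
          simp only [makeArglistLoopA, reduceIte] at *
          rw [splitFirst_esc, hih]; simp
      · by_cases hcol : c = ':'
        · subst hcol
          have hlen : rest.length ≤ n := by simp at h; omega
          have hih := ih rest [] hlen
          simp only [makeArglistLoopA, reduceIte, if_neg hc]
          rw [splitFirst_colon, hih]
          simp [optRest, makeAltTokens_eq (chars := rest)]
        · have hlen : rest.length ≤ n := by simp at h; omega
          have hih := ih rest (token ++ [c]) hlen
          simp only [makeArglistLoopA, reduceIte, if_neg hc, if_neg hcol]
          rw [splitFirst_other c rest hc hcol, hih]; simp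

-- ===== VERDICT (by name: the statement is the Claim_ definition above) =====
theorem make_arglist_spec : Claim_equal_make_arglist := by
  intro s _
  unfold Spec_make_arglist make_arglist make_arglist_alt
  by_cases h : s.toList = []
  · simp [h]
  · simp only [h, if_neg, reduceIte]
    rw [key s.toList.length s.toList [] le_rfl, makeAltTokens_eq]
    simp
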